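-- pv_equiv track=rewrite | github.com/sfgeekgit/ml_dandylion_deepQ | game.py | spread_seeds
-- ===== SOURCE A (Python) =====
-- import copy
--
-- BOARD_HEIGHT = BOARD_WIDTH = 5  # will always be 5
--
-- BOARD_HEIGHT = BOARD_WIDTH = 5  # will always be 5
--
-- def spread_seeds(board, direction_tuple):
--     new_board = copy.deepcopy(board)
--     for row in range(BOARD_HEIGHT):
--         for col in range(BOARD_WIDTH):
--             if board[row][col] == 1:
--                 dx, dy = direction_tuple
--                 new_row, new_col = row + dx, col + dy
--                 while 0 <= new_row < BOARD_HEIGHT and 0 <= new_col < BOARD_WIDTH: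
--                     if new_board[new_row][new_col] == 0:
--                         new_board[new_row][new_col] = 2
--                     new_row += dx
--                     new_col += dy
--     return new_board
-- ===== SOURCE B (Python) =====
-- import copy
--
-- BOARD_HEIGHT = BOARD_WIDTH = 5  # will always be 5
--
--
-- def spread_seeds(board, direction_tuple):
--     # Gather formulation: instead of spreading from each seed, each empty cell
--     # looks backwards along the direction (up to 4 steps fit on a 5x5 board)
--     # for a seed that would have reached it.
--     dx, dy = direction_tuple
--     new_board = copy.deepcopy(board)
--     if dx == 0 and dy == 0:
--         return new_board
--     for row in range(BOARD_HEIGHT):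
--         for col in range(BOARD_WIDTH):
--             if new_board[row][col] == 0 and any(
--                 0 <= row - k * dx < BOARD_HEIGHT
--                 and 0 <= col - k * dy < BOARD_WIDTH
--                 and board[row - k * dx][col - k * dy] == 1
--                 for k in range(1, 5)
--             ):
--                 new_board[row][col] = 2
--     return new_board
-- ===== Notes on version B (the rewrite author's own statement) =====
-- stated objective: alternative
-- what changed: Replaces A's per-seed outward scatter scan (re-walking a ray from every seed, repeatedly touching the same cells) by a single per-cell gather: each empty cell looks back at most 4 steps along the direction for a seed, so each cell is decided once; direction (0,0), on which A loops forever whenever a seed exists, returns the copy immediately.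
import Mathlib
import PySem

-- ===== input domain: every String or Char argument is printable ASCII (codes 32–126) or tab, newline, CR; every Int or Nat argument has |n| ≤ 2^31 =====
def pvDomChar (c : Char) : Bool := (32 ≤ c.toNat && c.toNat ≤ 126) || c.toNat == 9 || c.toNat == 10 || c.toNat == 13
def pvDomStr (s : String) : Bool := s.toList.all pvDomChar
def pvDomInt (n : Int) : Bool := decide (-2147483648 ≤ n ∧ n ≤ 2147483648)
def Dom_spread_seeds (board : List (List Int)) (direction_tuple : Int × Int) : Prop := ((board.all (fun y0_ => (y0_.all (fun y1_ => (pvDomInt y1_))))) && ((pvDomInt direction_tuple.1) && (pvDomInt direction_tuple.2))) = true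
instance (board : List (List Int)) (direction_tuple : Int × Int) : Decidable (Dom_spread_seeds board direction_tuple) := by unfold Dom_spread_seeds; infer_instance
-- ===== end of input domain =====

-- B replaces A's per-seed outward scatter scan by a per-cell bounded lookback (gather); A mutates only its fresh copy, so return-value equivalence is the whole story.

-- ===== PORT A =====
-- 2-D read/write primitives for the list-of-lists board (callers keep indices in the 5x5 window)

def pvInR (r c : Int) : Bool := decide (0 ≤ r ∧ r < 5 ∧ 0 ≤ c ∧ c < 5)

def pvGet (b : List (List Int)) (r c : Int) : Int := (b.getD r.toNat []).getD c.toNat 0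

def pvSet (b : List (List Int)) (r c : Int) (v : Int) : List (List Int) :=
  b.modify r.toNat (fun row => row.set c.toNat v)

-- A's while loop; the fuel (10) only makes the recursion total: inside Pre_ the walk
-- leaves the 5x5 window after at most 5 in-range steps, so the fuel is never exhausted there.

def pvLoopA (dx dy : Int) : Nat → Int → Int → List (List Int) → List (List Int)
  | 0, _, _, nb => nb
  | f + 1, r, c, nb =>
    if pvInR r c then
      let nb' := if pvGet nb r c == 0 then pvSet nb r c 2 else nb
      pvLoopA dx dy f (r + dx) (c + dy) nb'
    else nb

def spread_seeds (board : List (List Int)) (direction_tuple : Int × Int) : List (List Int) :=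
  (PySem.List.pyRange 0 5 1).foldl (fun nb row =>
    (PySem.List.pyRange 0 5 1).foldl (fun nb col =>
      if pvGet board row col == 1 then
        pvLoopA direction_tuple.1 direction_tuple.2 10
          (row + direction_tuple.1) (col + direction_tuple.2) nb
      else nb) nb) board

-- ===== PORT B =====

def pvSeeded (board : List (List Int)) (r c : Int) : Bool :=
  pvInR r c && (pvGet board r c == 1)

def spread_seeds_alt (board : List (List Int)) (direction_tuple : Int × Int) : List (List Int) :=
  let dx := direction_tuple.1
  let dy := direction_tuple.2
  if dx == 0 && dy == 0 then board
  else
    (PySem.List.pyRange 0 5 1).foldl (fun nb row =>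
      (PySem.List.pyRange 0 5 1).foldl (fun nb col =>
        if pvGet nb row col == 0 &&
            (PySem.List.pyRange 1 5 1).any (fun k =>
              pvSeeded board (row - k * dx) (col - k * dy)) then
          pvSet nb row col 2
        else nb) nb) board

-- ===== PRECONDITION & SPEC =====
-- Pre_ = exactly the inputs on which A returns: at least 5 rows whose first 5 each have at
-- least 5 entries (otherwise A raises IndexError), and direction (0,0) only when the 5x5
-- window holds no seed (otherwise A's while loop never terminates).

def Pre_spread_seeds (board : List (List Int)) (direction_tuple : Int × Int) : Prop :=
  5 ≤ board.length ∧ (∀ row ∈ board.take 5, 5 ≤ row.length) ∧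
  (direction_tuple.1 = 0 ∧ direction_tuple.2 = 0 →
    ∀ row ∈ board.take 5, ∀ v ∈ row.take 5, v ≠ 1)

instance (board : List (List Int)) (direction_tuple : Int × Int) : Decidable (Pre_spread_seeds board direction_tuple) := by unfold Pre_spread_seeds; infer_instance

def pvWitness_spread_seeds : List (List Int) × (Int × Int) :=
  ([[1,0,0,0,0],[0,0,0,0,0],[0,0,3,0,0],[0,2,0,0,1],[0,0,0,0,0]], (1, 1))

def Spec_spread_seeds (board : List (List Int)) (direction_tuple : Int × Int) (out : List (List Int)) : Prop := out = spread_seeds_alt board direction_tuple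
instance (board : List (List Int)) (direction_tuple : Int × Int) (out : List (List Int)) : Decidable (Spec_spread_seeds board direction_tuple out) := by unfold Spec_spread_seeds; infer_instance

-- ===== CLAIM (what is proved, stated in full; the proofs are below) =====
def Claim_equal_spread_seeds : Prop := ∀ (board : List (List Int)) (direction_tuple : Int × Int), Dom_spread_seeds board direction_tuple → Pre_spread_seeds board direction_tuple → Spec_spread_seeds board direction_tuple (spread_seeds board direction_tuple)

-- ===== LEMMAS AND PROOFS =====
-- proof-side view: the board with a Boolean mark predicate applied (window 0-cells with M set become 2);
-- both ports are shown equal to pvMark of their hit predicate, and the predicates agree.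

def pvShape (b : List (List Int)) : Prop :=
  5 ≤ b.length ∧ ∀ i : Nat, i < 5 → ∀ h : i < b.length, 5 ≤ (b[i]'h).length

def pvMark (b : List (List Int)) (M : Int → Int → Bool) : List (List Int) :=
  b.mapIdx (fun r row => row.mapIdx (fun c v =>
    if r < 5 ∧ c < 5 ∧ v = 0 ∧ M (r : Int) (c : Int) = true then 2 else v))

lemma pvGet_elem (b : List (List Int)) (i j : Nat) (hi : i < b.length)
    (hj : j < (b[i]'hi).length) : pvGet b (i : Int) (j : Int) = (b[i]'hi)[j]'hj := by
  simp [pvGet, List.getD_eq_getElem?_getD, hi, hj]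

lemma pvGet_mark (b : List (List Int)) (M : Int → Int → Bool) (r c : Int)
    (hs : pvShape b) (hr : pvInR r c = true) :
    pvGet (pvMark b M) r c =
      (if pvGet b r c = 0 ∧ M r c = true then 2 else pvGet b r c) := by
  simp only [pvInR, decide_eq_true_eq] at hr
  obtain ⟨h1, h2, h3, h4⟩ := hr
  obtain ⟨hbl, hrows⟩ := hs
  have hi : r.toNat < b.length := by omega
  have h5 := hrows r.toNat (by omega) hi
  have hj : c.toNat < (b[r.toNat]'hi).length := by omega
  have hcr : ((r.toNat : Int)) = r := by omega
  have hcc : ((c.toNat : Int)) = c := by omega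
  have e1 := pvGet_elem b r.toNat c.toNat hi hj
  have hi' : r.toNat < (pvMark b M).length := by simpa [pvMark] using hi
  have hj' : c.toNat < ((pvMark b M)[r.toNat]'hi').length := by simpa [pvMark] using hj
  have e2 := pvGet_elem (pvMark b M) r.toNat c.toNat hi' hj'
  rw [hcr, hcc] at e1 e2
  rw [e1, e2]
  simp only [pvMark, List.getElem_mapIdx]
  simp [hcr, hcc, show r.toNat < 5 by omega, show c.toNat < 5 by omega]

lemma pvMark_congr (b : List (List Int)) (M M' : Int → Int → Bool)
    (h : ∀ r c : Int, pvInR r c = true → pvGet b r c = 0 → M r c = M' r c) :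
    pvMark b M = pvMark b M' := by
  apply List.ext_getElem (by simp [pvMark])
  intro i h1 h2
  have hib : i < b.length := by simpa [pvMark] using h1
  simp only [pvMark, List.getElem_mapIdx] at h1 h2 ⊢
  apply List.ext_getElem (by simp)
  intro j hj1 hj2
  have hjb : j < (b[i]'hib).length := by simpa using hj1
  simp only [List.getElem_mapIdx]
  by_cases hw : i < 5 ∧ j < 5
  · by_cases hv : b[i][j] = 0
    · have hin : pvInR (i : Int) (j : Int) = true := by
        simp only [pvInR, decide_eq_true_eq]; omega
      have hg : pvGet b (i : Int) (j : Int) = 0 := by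
        rw [pvGet_elem b i j hib hjb]; exact hv
      rw [h _ _ hin hg]
    · simp [hv]
  · simp only [not_and_or] at hw
    rcases hw with hw | hw <;> simp [hw]

lemma pvMark_false (b : List (List Int)) :
    pvMark b (fun _ _ => false) = b := by
  apply List.ext_getElem (by simp [pvMark])
  intro i h1 h2
  simp only [pvMark, List.getElem_mapIdx]
  apply List.ext_getElem (by simp)
  intro j hj1 hj2
  simp

lemma pvSet_mark (b : List (List Int)) (M : Int → Int → Bool) (r c : Int)
    (hs : pvShape b) (hr : pvInR r c = true) (h0 : pvGet b r c = 0) :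
    pvSet (pvMark b M) r c 2 =
      pvMark b (fun r' c' => M r' c' || (r' == r && c' == c)) := by
  simp only [pvInR, decide_eq_true_eq] at hr
  obtain ⟨h1, h2, h3, h4⟩ := hr
  obtain ⟨hbl, hrows⟩ := hs
  have hi : r.toNat < b.length := by omega
  have h5 := hrows r.toNat (by omega) hi
  have hj : c.toNat < (b[r.toNat]'hi).length := by omega
  have hcr : ((r.toNat : Int)) = r := by omega
  have hcc : ((c.toNat : Int)) = c := by omega
  have hv : (b[r.toNat]'hi)[c.toNat]'hj = 0 := by
    rw [← pvGet_elem b r.toNat c.toNat hi hj, hcr, hcc]; exact h0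
  apply List.ext_getElem (by simp [pvSet, pvMark])
  intro i hL hR
  have hib : i < b.length := by simpa [pvSet, pvMark] using hL
  by_cases hir : r.toNat = i
  · subst hir
    rw [show (pvSet (pvMark b M) r c 2)[r.toNat]'hL =
        ((pvMark b M)[r.toNat]'(by simpa [pvMark] using hib)).set c.toNat 2 from by
      simp [pvSet]]
    apply List.ext_getElem (by simp [pvMark])
    intro j hj1 hj2
    have hjb : j < (b[r.toNat]'hi).length := by simpa [pvMark] using hj2
    simp only [pvMark, List.getElem_set, List.getElem_mapIdx]
    by_cases hjc : c.toNat = j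
    · subst hjc
      rw [if_pos rfl, if_pos ⟨by omega, by omega, hv, by simp [hcr, hcc]⟩]
    · rw [if_neg hjc]
      have hne : ¬ ((j : Int) = c) := by omega
      simp [hne]
  · rw [show (pvSet (pvMark b M) r c 2)[i]'hL =
        ((pvMark b M)[i]'(by simpa [pvMark] using hib)) from by
      simp [pvSet, hir]]
    have hne : ¬ ((i : Int) = r) := by omega
    simp only [pvMark, List.getElem_mapIdx]
    apply List.ext_getElem (by simp)
    intro j hj1 hj2
    simp [hne]

def pvRay (dx dy : Int) : Nat → Int → Int → Int → Int → Bool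
  | 0, _, _, _, _ => false
  | f + 1, r, c, r', c' =>
    pvInR r c && ((r' == r && c' == c) || pvRay dx dy f (r + dx) (c + dy) r' c')

lemma pvLoopA_mark (dx dy : Int) (b : List (List Int)) (hs : pvShape b) :
    ∀ (f : Nat) (r c : Int) (M : Int → Int → Bool),
      pvLoopA dx dy f r c (pvMark b M) =
        pvMark b (fun r' c' => M r' c' || pvRay dx dy f r c r' c') := by
  intro f
  induction f with
  | zero => intro r c M; simp [pvLoopA, pvRay]
  | succ f ih =>
    intro r c M
    by_cases hp : pvInR r c = true
    · rw [pvLoopA, if_pos hp]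
      simp only []
      rw [pvGet_mark b M r c hs hp]
      by_cases hcase : pvGet b r c = 0 ∧ M r c = true
      · rw [if_pos hcase]
        have h2 : ((2:Int) == 0) = false := by decide
        rw [h2]
        simp only [Bool.false_eq_true, if_false]
        rw [ih]
        apply pvMark_congr
        intro r' c' hin hz
        rw [pvRay, hp]
        by_cases hq : r' = r ∧ c' = c
        · obtain ⟨e1, e2⟩ := hq; subst e1; subst e2
          simp [hcase.2]
        · have : ((r' == r && c' == c)) = false := by
            rcases not_and_or.mp hq with h | h <;> simp [h]
          simp [this]
      · rw [if_neg hcase]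
        by_cases h0 : pvGet b r c = 0
        · have hb0 : (pvGet b r c == 0) = true := by simp [h0]
          rw [hb0]
          simp only [if_true]
          rw [pvSet_mark b M r c hs hp h0, ih]
          apply pvMark_congr
          intro r' c' hin hz
          rw [pvRay, hp]
          simp [Bool.or_assoc]
        · have hb0 : (pvGet b r c == 0) = false := by simp [h0]
          rw [hb0]
          simp only [Bool.false_eq_true, if_false]
          rw [ih]
          apply pvMark_congr
          intro r' c' hin hz
          rw [pvRay, hp]
          by_cases hq : (r' == r && c' == c) = true
          · exfalso
            have : r' = r ∧ c' = c := by simpa using hq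
            obtain ⟨e1, e2⟩ := this; subst e1; subst e2
            exact h0 hz
          · simp [Bool.eq_false_iff.mpr hq]
    · rw [pvLoopA, if_neg hp]
      apply pvMark_congr
      intro r' c' hin hz
      rw [pvRay]
      simp [Bool.eq_false_iff.mpr hp]

def pvCells : List (Int × Int) :=
  (PySem.List.pyRange 0 5 1).flatMap (fun r => (PySem.List.pyRange 0 5 1).map (fun c => (r, c)))

def pvHitA (b : List (List Int)) (dx dy : Int) (r' c' : Int) : Bool :=
  pvCells.any (fun p => (pvGet b p.1 p.2 == 1) && pvRay dx dy 10 (p.1 + dx) (p.2 + dy) r' c')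

def pvHitB (b : List (List Int)) (dx dy : Int) (r c : Int) : Bool :=
  (PySem.List.pyRange 1 5 1).any (fun k => pvSeeded b (r - k * dx) (c - k * dy))

lemma foldl_double {α : Type} (g : (Int × Int) → α → α) (rows cols : List Int) :
    ∀ (init : α),
      rows.foldl (fun nb r => cols.foldl (fun nb c => g (r, c) nb) nb) init
      = (rows.flatMap (fun r => cols.map (fun c => (r, c)))).foldl (fun nb p => g p nb) init := by
  induction rows with
  | nil => intro init; rfl
  | cons r rest ih =>
    intro init
    simp only [List.foldl_cons, List.flatMap_cons, List.foldl_append, List.foldl_map]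
    rw [ih]

lemma foldA (dx dy : Int) (b : List (List Int)) (hs : pvShape b) :
    ∀ (cells : List (Int × Int)) (M : Int → Int → Bool),
      cells.foldl (fun nb p => if pvGet b p.1 p.2 == 1 then
          pvLoopA dx dy 10 (p.1 + dx) (p.2 + dy) nb else nb) (pvMark b M)
      = pvMark b (fun r' c' => M r' c' ||
          cells.any (fun p => (pvGet b p.1 p.2 == 1) && pvRay dx dy 10 (p.1 + dx) (p.2 + dy) r' c')) := by
  intro cells
  induction cells with
  | nil => intro M; simp
  | cons p rest ih =>
    intro M
    simp only [List.foldl_cons]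
    by_cases hseed : (pvGet b p.1 p.2 == 1) = true
    · rw [if_pos hseed, pvLoopA_mark dx dy b hs, ih]
      apply congrArg
      funext r' c'
      simp [hseed, Bool.or_assoc]
    · rw [if_neg (by simp [Bool.eq_false_iff.mpr hseed]), ih]
      apply congrArg
      funext r' c'
      simp [Bool.eq_false_iff.mpr hseed]

lemma foldB (dx dy : Int) (b : List (List Int)) (hs : pvShape b) :
    ∀ (cells : List (Int × Int)) (M : Int → Int → Bool),
      (∀ p ∈ cells, pvInR p.1 p.2 = true) →
      cells.foldl (fun nb p => if pvGet nb p.1 p.2 == 0 && pvHitB b dx dy p.1 p.2 then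
          pvSet nb p.1 p.2 2 else nb) (pvMark b M)
      = pvMark b (fun r' c' => M r' c' ||
          (cells.any (fun p => p.1 == r' && p.2 == c') && pvHitB b dx dy r' c')) := by
  intro cells
  induction cells with
  | nil => intro M _; simp
  | cons p rest ih =>
    intro M hmem
    have hp : pvInR p.1 p.2 = true := hmem p (List.mem_cons_self)
    have hrest : ∀ q ∈ rest, pvInR q.1 q.2 = true := fun q hq => hmem q (List.mem_cons_of_mem _ hq)
    simp only [List.foldl_cons]
    rw [pvGet_mark b M p.1 p.2 hs hp]
    by_cases hcase : pvGet b p.1 p.2 = 0 ∧ M p.1 p.2 = true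
    · rw [if_pos hcase]
      have h2 : ((2:Int) == 0) = false := by decide
      rw [h2]
      simp only [Bool.false_and, Bool.false_eq_true, if_false]
      rw [ih _ hrest]
      apply pvMark_congr
      intro r' c' hin hz
      by_cases hq : p.1 = r' ∧ p.2 = c'
      · obtain ⟨e1, e2⟩ := hq; subst e1; subst e2
        simp [hcase.2]
      · have : (p.1 == r' && p.2 == c') = false := by
          rcases not_and_or.mp hq with h | h <;> simp [h]
        simp [this]
    · rw [if_neg hcase]
      by_cases h0 : pvGet b p.1 p.2 = 0
      · have hM : M p.1 p.2 = false := by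
          rcases Bool.eq_false_or_eq_true (M p.1 p.2) with h | h
          · exact absurd ⟨h0, h⟩ hcase
          · exact h
        have hb0 : (pvGet b p.1 p.2 == 0) = true := by simp [h0]
        rw [hb0, Bool.true_and]
        by_cases hhit : pvHitB b dx dy p.1 p.2 = true
        · rw [if_pos hhit, pvSet_mark b M p.1 p.2 hs hp h0, ih _ hrest]
          apply pvMark_congr
          intro r' c' hin hz
          by_cases hq : p.1 = r' ∧ p.2 = c'
          · obtain ⟨e1, e2⟩ := hq; subst e1; subst e2
            simp [hhit]
          · have e1 : (p.1 == r' && p.2 == c') = false := by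
              rcases not_and_or.mp hq with h | h <;> simp [h]
            have e2 : (r' == p.1 && c' == p.2) = false := by
              rcases not_and_or.mp hq with h | h
              · simp only [Bool.and_eq_false_iff, beq_eq_false_iff_ne, ne_eq]
                exact Or.inl (fun a => h a.symm)
              · simp only [Bool.and_eq_false_iff, beq_eq_false_iff_ne, ne_eq]
                exact Or.inr (fun a => h a.symm)
            simp [e1, e2]
        · rw [if_neg hhit, ih _ hrest]
          apply pvMark_congr
          intro r' c' hin hz
          by_cases hq : p.1 = r' ∧ p.2 = c'
          · obtain ⟨e1, e2⟩ := hq; subst e1; subst e2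
            simp [Bool.eq_false_iff.mpr hhit, hM]
          · have e1 : (p.1 == r' && p.2 == c') = false := by
              rcases not_and_or.mp hq with h | h <;> simp [h]
            simp [e1]
      · have hb0 : (pvGet b p.1 p.2 == 0) = false := by simp [h0]
        rw [hb0]
        simp only [Bool.false_and, Bool.false_eq_true, if_false]
        rw [ih _ hrest]
        apply pvMark_congr
        intro r' c' hin hz
        by_cases hq : p.1 = r' ∧ p.2 = c'
        · obtain ⟨e1, e2⟩ := hq; subst e1; subst e2
          exact absurd hz h0
        · have e1 : (p.1 == r' && p.2 == c') = false := by
            rcases not_and_or.mp hq with h | h <;> simp [h]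
          simp [e1]

lemma spread_seeds_eq_mark (b : List (List Int)) (d : Int × Int) (hs : pvShape b) :
    spread_seeds b d = pvMark b (pvHitA b d.1 d.2) := by
  have h := foldA d.1 d.2 b hs pvCells (fun _ _ => false)
  rw [pvMark_false] at h
  have hd := foldl_double
    (g := fun (p : Int × Int) nb => if pvGet b p.1 p.2 == 1 then
      pvLoopA d.1 d.2 10 (p.1 + d.1) (p.2 + d.2) nb else nb)
    (PySem.List.pyRange 0 5 1) (PySem.List.pyRange 0 5 1) b
  have key : spread_seeds b d = pvMark b (fun r' c' => false ||
      pvCells.any (fun p => (pvGet b p.1 p.2 == 1) &&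
        pvRay d.1 d.2 10 (p.1 + d.1) (p.2 + d.2) r' c')) := hd.trans h
  rw [key]
  apply congrArg
  funext r' c'
  simp [pvHitA]

lemma pvCells_any (r c : Int) (hin : pvInR r c = true) :
    (pvCells.any (fun p => p.1 == r && p.2 == c)) = true := by
  simp only [pvInR, decide_eq_true_eq] at hin
  obtain ⟨h1, h2, h3, h4⟩ := hin
  have hr : r = 0 ∨ r = 1 ∨ r = 2 ∨ r = 3 ∨ r = 4 := by omega
  have hc : c = 0 ∨ c = 1 ∨ c = 2 ∨ c = 3 ∨ c = 4 := by omega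
  rcases hr with rfl | rfl | rfl | rfl | rfl <;>
    rcases hc with rfl | rfl | rfl | rfl | rfl <;> decide

lemma pvCells_inR : ∀ p ∈ pvCells, pvInR p.1 p.2 = true := by decide

lemma pvCells_mem (a c : Int) (hin : pvInR a c = true) : (a, c) ∈ pvCells := by
  simp only [pvInR, decide_eq_true_eq] at hin
  obtain ⟨h1, h2, h3, h4⟩ := hin
  have hr : a = 0 ∨ a = 1 ∨ a = 2 ∨ a = 3 ∨ a = 4 := by omega
  have hc : c = 0 ∨ c = 1 ∨ c = 2 ∨ c = 3 ∨ c = 4 := by omega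
  rcases hr with rfl | rfl | rfl | rfl | rfl <;>
    rcases hc with rfl | rfl | rfl | rfl | rfl <;> decide

lemma spread_seeds_alt_eq_mark (b : List (List Int)) (d : Int × Int) (hs : pvShape b)
    (hd0 : ¬ (d.1 = 0 ∧ d.2 = 0)) :
    spread_seeds_alt b d = pvMark b (pvHitB b d.1 d.2) := by
  have hmem : ∀ p ∈ pvCells, pvInR p.1 p.2 = true := by decide
  have h := foldB d.1 d.2 b hs pvCells (fun _ _ => false) hmem
  rw [pvMark_false] at h
  have hd := foldl_double
    (g := fun (p : Int × Int) nb => if pvGet nb p.1 p.2 == 0 && pvHitB b d.1 d.2 p.1 p.2 then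
      pvSet nb p.1 p.2 2 else nb)
    (PySem.List.pyRange 0 5 1) (PySem.List.pyRange 0 5 1) b
  have hcond : (d.1 == 0 && d.2 == 0) = false := by
    rcases not_and_or.mp hd0 with h' | h' <;> simp [h']
  have key : spread_seeds_alt b d = pvMark b (fun r' c' => false ||
      (pvCells.any (fun p => p.1 == r' && p.2 == c') && pvHitB b d.1 d.2 r' c')) := by
    refine Eq.trans ?_ (hd.trans h)
    show (if (d.1 == 0 && d.2 == 0) = true then b else _) = _
    rw [hcond]
    simp only [Bool.false_eq_true, if_false]
    rfl
  rw [key]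
  apply pvMark_congr
  intro r' c' hin hz
  simp [pvCells_any r' c' hin]

lemma pvRange15_mem (x : Int) (h1 : 1 ≤ x) (h2 : x ≤ 4) : x ∈ PySem.List.pyRange 1 5 1 := by
  have hx : x = 1 ∨ x = 2 ∨ x = 3 ∨ x = 4 := by omega
  rcases hx with rfl | rfl | rfl | rfl <;> decide

lemma pvRange15_bounds : ∀ x ∈ PySem.List.pyRange 1 5 1, 1 ≤ x ∧ x ≤ 4 := by decide

lemma pvRay_intro (dx dy r' c' : Int) :
    ∀ (k f : Nat) (r c : Int), k < f →
      (∀ j : Nat, j ≤ k → pvInR (r + (j : Int) * dx) (c + (j : Int) * dy) = true) →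
      r' = r + (k : Int) * dx → c' = c + (k : Int) * dy →
      pvRay dx dy f r c r' c' = true := by
  intro k
  induction k with
  | zero =>
    intro f r c hkf hj hr hc
    obtain ⟨f', rfl⟩ : ∃ f', f = f' + 1 := ⟨f - 1, by omega⟩
    have h0 := hj 0 (by omega)
    simp only [Nat.cast_zero, zero_mul, add_zero] at h0
    rw [pvRay, h0]
    simp only [Nat.cast_zero, zero_mul, add_zero] at hr hc
    simp [hr, hc]
  | succ k ihk =>
    intro f r c hkf hj hr hc
    obtain ⟨f', rfl⟩ : ∃ f', f = f' + 1 := ⟨f - 1, by omega⟩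
    have h0 := hj 0 (by omega)
    simp only [Nat.cast_zero, zero_mul, add_zero] at h0
    rw [pvRay, h0]
    have hrec : pvRay dx dy f' (r + dx) (c + dy) r' c' = true := by
      apply ihk f' (r + dx) (c + dy) (by omega)
      · intro j hjle
        have h := hj (j + 1) (by omega)
        have e1 : r + ((j + 1 : Nat) : Int) * dx = (r + dx) + (j : Int) * dx := by
          push_cast; ring
        have e2 : c + ((j + 1 : Nat) : Int) * dy = (c + dy) + (j : Int) * dy := by
          push_cast; ring
        rwa [e1, e2] at h
      · rw [hr]; push_cast; ring
      · rw [hc]; push_cast; ring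
    simp [hrec]

lemma pvRay_elim (dx dy r' c' : Int) :
    ∀ (f : Nat) (r c : Int), pvRay dx dy f r c r' c' = true →
      ∃ k : Nat, r' = r + (k : Int) * dx ∧ c' = c + (k : Int) * dy := by
  intro f
  induction f with
  | zero => intro r c h; simp [pvRay] at h
  | succ f ih =>
    intro r c h
    rw [pvRay] at h
    obtain ⟨h1, h2⟩ := Bool.and_eq_true_iff.mp h
    rcases Bool.or_eq_true_iff.mp h2 with h3 | h3
    · obtain ⟨e1, e2⟩ := Bool.and_eq_true_iff.mp h3
      exact ⟨0, by simpa using (beq_iff_eq.mp e1), by simpa using (beq_iff_eq.mp e2)⟩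
    · obtain ⟨k, hk1, hk2⟩ := ih (r + dx) (c + dy) h3
      refine ⟨k + 1, ?_, ?_⟩
      · rw [hk1]; push_cast; ring
      · rw [hk2]; push_cast; ring

lemma pvBetween (s e j k : Int) (h0 : 0 ≤ j) (hjk : j ≤ k)
    (hs0 : 0 ≤ s) (hs4 : s < 5) (he0 : 0 ≤ s + k * e) (he4 : s + k * e < 5) :
    0 ≤ s + j * e ∧ s + j * e < 5 := by
  rcases le_or_gt 0 e with he | he
  · have h1 : j * e ≤ k * e := mul_le_mul_of_nonneg_right hjk he
    have h2 : 0 ≤ j * e := mul_nonneg h0 he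
    constructor <;> linarith
  · have h1 : k * e ≤ j * e := mul_le_mul_of_nonpos_right hjk (le_of_lt he)
    have h2 : j * e ≤ 0 := mul_nonpos_of_nonneg_of_nonpos h0 (le_of_lt he)
    constructor <;> linarith

lemma pvStep_le (m e : Int) (hm : 1 ≤ m) (he : e ≠ 0) (hb1 : -4 ≤ m * e) (hb2 : m * e ≤ 4) :
    m ≤ 4 := by
  rcases lt_or_gt_of_ne he with h | h
  · nlinarith
  · nlinarith

lemma pvHit_agree (b : List (List Int)) (dx dy : Int) (hd : ¬ (dx = 0 ∧ dy = 0))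
    (r c : Int) (hr : pvInR r c = true) :
    pvHitA b dx dy r c = pvHitB b dx dy r c := by
  have hrr := hr
  simp only [pvInR, decide_eq_true_eq] at hrr
  obtain ⟨hr1, hr2, hr3, hr4⟩ := hrr
  rw [Bool.eq_iff_iff]
  constructor
  · intro h
    obtain ⟨p, hp, hband⟩ := List.any_eq_true.mp h
    obtain ⟨hseed, hray⟩ := Bool.and_eq_true_iff.mp hband
    have hpin := pvCells_inR p hp
    have hpin' := hpin
    simp only [pvInR, decide_eq_true_eq] at hpin'
    obtain ⟨hp1, hp2, hp3, hp4⟩ := hpin'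
    obtain ⟨k, hk1, hk2⟩ := pvRay_elim dx dy r c 10 (p.1 + dx) (p.2 + dy) hray
    set m : Int := (k : Int) + 1 with hm
    have hmd : m * dx = r - p.1 := by rw [hk1]; ring
    have hme : m * dy = c - p.2 := by rw [hk2]; ring
    have hm1 : 1 ≤ m := by omega
    have hm4 : m ≤ 4 := by
      rcases not_and_or.mp hd with h' | h'
      · exact pvStep_le m dx hm1 h' (by omega) (by omega)
      · exact pvStep_le m dy hm1 h' (by omega) (by omega)
    apply List.any_eq_true.mpr
    refine ⟨m, pvRange15_mem m hm1 hm4, ?_⟩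
    have e1 : r - m * dx = p.1 := by omega
    have e2 : c - m * dy = p.2 := by omega
    rw [e1, e2]
    simp [pvSeeded, hpin, hseed]
  · intro h
    obtain ⟨k, hkmem, hseeded⟩ := List.any_eq_true.mp h
    obtain ⟨hk1, hk4⟩ := pvRange15_bounds k hkmem
    obtain ⟨hin, hseed⟩ := Bool.and_eq_true_iff.mp hseeded
    have hin' := hin
    simp only [pvInR, decide_eq_true_eq] at hin'
    obtain ⟨hs1, hs2, hs3, hs4⟩ := hin'
    apply List.any_eq_true.mpr
    refine ⟨(r - k * dx, c - k * dy), pvCells_mem _ _ hin, ?_⟩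
    apply Bool.and_eq_true_iff.mpr
    refine ⟨hseed, ?_⟩
    have hkN : ((k - 1).toNat : Int) = k - 1 := by omega
    apply pvRay_intro dx dy r c (k - 1).toNat 10 ((r - k * dx) + dx) ((c - k * dy) + dy)
      (by omega)
    · intro j hjle
      have hj' : (0 : Int) ≤ (j : Int) + 1 := by omega
      have hjk : ((j : Int) + 1) ≤ k := by omega
      have hb1 := pvBetween (r - k * dx) dx ((j : Int) + 1) k hj' hjk hs1 hs2
        (by have : r - k * dx + k * dx = r := by ring
            omega)
        (by have : r - k * dx + k * dx = r := by ring
            omega)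
      have hb2 := pvBetween (c - k * dy) dy ((j : Int) + 1) k hj' hjk hs3 hs4
        (by have : c - k * dy + k * dy = c := by ring
            omega)
        (by have : c - k * dy + k * dy = c := by ring
            omega)
      have e1 : (r - k * dx) + dx + (j : Int) * dx = (r - k * dx) + ((j : Int) + 1) * dx := by
        ring
      have e2 : (c - k * dy) + dy + (j : Int) * dy = (c - k * dy) + ((j : Int) + 1) * dy := by
        ring
      rw [e1, e2]
      simp only [pvInR, decide_eq_true_eq]
      exact ⟨hb1.1, hb1.2, hb2.1, hb2.2⟩
    · rw [hkN]; ring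
    · rw [hkN]; ring

lemma pv_noseed (b : List (List Int)) (hs : pvShape b)
    (hns : ∀ row ∈ b.take 5, ∀ v ∈ row.take 5, v ≠ 1) :
    ∀ p ∈ pvCells, (pvGet b p.1 p.2 == 1) = false := by
  intro p hp
  have hin := pvCells_inR p hp
  simp only [pvInR, decide_eq_true_eq] at hin
  obtain ⟨h1, h2, h3, h4⟩ := hin
  obtain ⟨hbl, hrows⟩ := hs
  have hi : p.1.toNat < b.length := by omega
  have h5 := hrows p.1.toNat (by omega) hi
  have hj : p.2.toNat < (b[p.1.toNat]'hi).length := by omega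
  have hrowmem : (b[p.1.toNat]'hi) ∈ b.take 5 := by
    rw [List.mem_take_iff_getElem]; exact ⟨p.1.toNat, by omega, rfl⟩
  have hvmem : (b[p.1.toNat]'hi)[p.2.toNat]'hj ∈ (b[p.1.toNat]'hi).take 5 := by
    rw [List.mem_take_iff_getElem]; exact ⟨p.2.toNat, by omega, rfl⟩
  have hne := hns _ hrowmem _ hvmem
  have e := pvGet_elem b p.1.toNat p.2.toNat hi hj
  have hc1 : ((p.1.toNat : Int)) = p.1 := by omega
  have hc2 : ((p.2.toNat : Int)) = p.2 := by omega
  rw [hc1, hc2] at e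
  rw [e]
  simp [hne]

theorem pv_main (b : List (List Int)) (d : Int × Int) (pre : Pre_spread_seeds b d) :
    spread_seeds b d = spread_seeds_alt b d := by
  have hs : pvShape b := by
    obtain ⟨h1, h2, _⟩ := pre
    refine ⟨h1, fun i hi hh => ?_⟩
    exact h2 _ (by rw [List.mem_take_iff_getElem]; exact ⟨i, by omega, rfl⟩)
  by_cases hd0 : d.1 = 0 ∧ d.2 = 0
  · have hc : (d.1 == 0 && d.2 == 0) = true := by simp [hd0.1, hd0.2]
    have halt : spread_seeds_alt b d = b := by
      simp only [spread_seeds_alt]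
      rw [if_pos hc]
    rw [halt, spread_seeds_eq_mark b d hs]
    have hns := pre.2.2 hd0
    have hA : pvMark b (pvHitA b d.1 d.2) = pvMark b (fun _ _ => false) := by
      apply pvMark_congr
      intro r' c' hin hz
      show pvHitA b d.1 d.2 r' c' = false
      rw [pvHitA, List.any_eq_false]
      intro p hp
      simp [pv_noseed b hs hns p hp]
    rw [hA, pvMark_false]
  · rw [spread_seeds_eq_mark b d hs, spread_seeds_alt_eq_mark b d hs hd0]
    apply pvMark_congr
    intro r' c' hin hz
    exact pvHit_agree b d.1 d.2 hd0 r' c' hin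

-- ===== VERDICT (by name: the statement is the Claim_ definition above) =====
theorem spread_seeds_spec : Claim_equal_spread_seeds := by
  intro board direction_tuple _ pre
  exact pv_main board direction_tuple pre
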